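-- pv_equiv track=rewrite | github.com/jej29/public_http_agent | agent/agent/core/severity.py | apply_combination_severity
-- ===== SOURCE A (Python) =====
-- from typing import Dict, List
--
-- SEVERITY_ORDER = {
--     "Info": 1,
--     "Low": 2,
--     "Medium": 3,
--     "High": 4,
-- }
--
-- def severity_rank(sev: str) -> int:
--     return SEVERITY_ORDER.get(str(sev or "Info"), 1)
--
-- def higher_severity(a: str, b: str) -> str:
--     return a if severity_rank(a) >= severity_rank(b) else b
--
-- def apply_combination_severity(findings: List[Dict]) -> List[Dict]:
--     if not findings:
--         return findings
--
--     has_config = any(f.get("type") == "HTTP_CONFIG_FILE_EXPOSURE" for f in findings)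
--     has_error = any(f.get("type") == "HTTP_ERROR_INFO_EXPOSURE" for f in findings)
--     has_directory = any(f.get("type") == "DIRECTORY_LISTING_ENABLED" for f in findings)
--     has_default_resource = any(f.get("type") == "DEFAULT_FILE_EXPOSED" for f in findings)
--
--     for finding in findings:
--         finding_type = str(finding.get("type") or "")
--         severity = str(finding.get("severity") or "Info")
--
--         if has_config and finding_type in {"HTTP_CONFIG_FILE_EXPOSURE", "DEFAULT_FILE_EXPOSED", "DIRECTORY_LISTING_ENABLED"}:
--             finding["severity"] = higher_severity(severity, "High")
--             continue
--
--         if has_directory and has_default_resource and finding_type in {"DIRECTORY_LISTING_ENABLED", "DEFAULT_FILE_EXPOSED"}: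
--             finding["severity"] = higher_severity(severity, "High")
--
--     return findings
-- ===== SOURCE B (Python) =====
-- def apply_combination_severity(findings):
--     # Build an index: type value -> list of positions having that type (one grouping pass).
--     by_type = {}
--     for i, f in enumerate(findings):
--         by_type.setdefault(f.get("type"), []).append(i)
--     # Pick the affected type group once from the index.
--     if "HTTP_CONFIG_FILE_EXPOSURE" in by_type:
--         affected = ("HTTP_CONFIG_FILE_EXPOSURE", "DEFAULT_FILE_EXPOSED", "DIRECTORY_LISTING_ENABLED")
--     elif "DIRECTORY_LISTING_ENABLED" in by_type and "DEFAULT_FILE_EXPOSED" in by_type: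
--         affected = ("DIRECTORY_LISTING_ENABLED", "DEFAULT_FILE_EXPOSED")
--     else:
--         affected = ()
--     # Bump by direct index lookup: no per-finding condition is ever tested here,
--     # and the bumped severity is always "High" (the maximal severity).
--     for t in affected:
--         for i in by_type.get(t, ()):
--             findings[i]["severity"] = "High"
--     return findings
-- ===== Notes on version B (the rewrite author's own statement) =====
-- stated objective: alternative
-- what changed: B builds a type->positions index in one grouping pass, picks the affected type group once, and then bumps only those rows by direct index lookup (writing the constant "High"), so the bump phase tests no per-finding condition, replacing A's four any() scans and per-finding two-branch conditional loop.
import Mathlib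
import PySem

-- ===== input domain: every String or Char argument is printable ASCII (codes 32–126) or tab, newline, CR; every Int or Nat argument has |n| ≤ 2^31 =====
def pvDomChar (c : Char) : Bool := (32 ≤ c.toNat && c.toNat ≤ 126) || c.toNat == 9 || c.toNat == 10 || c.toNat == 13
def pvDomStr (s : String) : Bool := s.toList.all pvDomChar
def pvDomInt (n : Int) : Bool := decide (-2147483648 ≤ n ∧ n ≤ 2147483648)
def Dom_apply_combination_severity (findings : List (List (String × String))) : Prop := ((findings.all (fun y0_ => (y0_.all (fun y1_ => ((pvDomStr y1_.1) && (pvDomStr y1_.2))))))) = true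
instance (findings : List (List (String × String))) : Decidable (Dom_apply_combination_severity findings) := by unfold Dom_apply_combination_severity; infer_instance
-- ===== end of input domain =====

-- B builds a type->positions index in one grouping pass, picks the affected type group
-- once, and bumps only those rows by direct index lookup (writing the constant "High"),
-- instead of A's four any() scans and per-finding conditional loop; return-value
-- equivalence (both Pythons mutate the dicts in place the same way).

-- ===== PORT A =====
def pvSEVERITY_ORDER : PySem.Dict String Int :=
  PySem.Dict.ofList [("Info", 1), ("Low", 2), ("Medium", 3), ("High", 4)]

def severity_rank (sev : String) : Int :=
  pvSEVERITY_ORDER.getD (if sev = "" then "Info" else sev) 1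

def higher_severity (a : String) (b : String) : String :=
  if severity_rank a ≥ severity_rank b then a else b

def apply_combination_severity (findings : List (List (String × String))) : List (List (String × String)) :=
  if findings = [] then findings else
  let has_config := findings.any (fun f => (PySem.Dict.mk f).get? "type" == some "HTTP_CONFIG_FILE_EXPOSURE")
  let _has_error := findings.any (fun f => (PySem.Dict.mk f).get? "type" == some "HTTP_ERROR_INFO_EXPOSURE")
  let has_directory := findings.any (fun f => (PySem.Dict.mk f).get? "type" == some "DIRECTORY_LISTING_ENABLED")
  let has_default_resource := findings.any (fun f => (PySem.Dict.mk f).get? "type" == some "DEFAULT_FILE_EXPOSED")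
  findings.map (fun finding =>
    let finding_type : String :=
      match (PySem.Dict.mk finding).get? "type" with
      | none => ""
      | some s => if s = "" then "" else s
    let severity : String :=
      match (PySem.Dict.mk finding).get? "severity" with
      | none => "Info"
      | some s => if s = "" then "Info" else s
    if has_config && (PySem.Set.contains (PySem.Set.ofList ["HTTP_CONFIG_FILE_EXPOSURE", "DEFAULT_FILE_EXPOSED", "DIRECTORY_LISTING_ENABLED"]) finding_type) then
      ((PySem.Dict.mk finding).insert "severity" (higher_severity severity "High")).items
    else if has_directory && has_default_resource && (PySem.Set.contains (PySem.Set.ofList ["DIRECTORY_LISTING_ENABLED", "DEFAULT_FILE_EXPOSED"]) finding_type) then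
      ((PySem.Dict.mk finding).insert "severity" (higher_severity severity "High")).items
    else finding)

-- ===== PORT B =====
-- findings[i]["severity"] = "High" on a position i taken from the index (always in range);
-- pyGet? is used for the read so the un-reachable out-of-range case is explicit.
def pvBumpIdx (xs : List (List (String × String))) (i : Int) : List (List (String × String)) :=
  match PySem.List.pyGet? xs i with
  | some f => xs.set i.toNat ((PySem.Dict.mk f).insert "severity" "High").items
  | none => xs

def apply_combination_severity_alt (findings : List (List (String × String))) : List (List (String × String)) :=
  let by_type : PySem.Dict (Option String) (List Int) :=
    (PySem.List.enumerate findings).foldl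
      (fun d p => d.modify ((PySem.Dict.mk p.2).get? "type") [] (· ++ [p.1])) PySem.Dict.empty
  let affected : List String :=
    if by_type.contains (some "HTTP_CONFIG_FILE_EXPOSURE") then
      ["HTTP_CONFIG_FILE_EXPOSURE", "DEFAULT_FILE_EXPOSED", "DIRECTORY_LISTING_ENABLED"]
    else if by_type.contains (some "DIRECTORY_LISTING_ENABLED") && by_type.contains (some "DEFAULT_FILE_EXPOSED") then
      ["DIRECTORY_LISTING_ENABLED", "DEFAULT_FILE_EXPOSED"]
    else []
  affected.foldl (fun xs t => (by_type.getD (some t) []).foldl pvBumpIdx xs) findings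

-- ===== PRECONDITION & SPEC =====
def Spec_apply_combination_severity (findings : List (List (String × String))) (out : List (List (String × String))) : Prop := out = apply_combination_severity_alt findings
instance (findings : List (List (String × String))) (out : List (List (String × String))) : Decidable (Spec_apply_combination_severity findings out) := by unfold Spec_apply_combination_severity; infer_instance

-- ===== CLAIM (what is proved, stated in full; the proofs are below) =====
def Claim_equal_apply_combination_severity : Prop := ∀ (findings : List (List (String × String))), Dom_apply_combination_severity findings → Spec_apply_combination_severity findings (apply_combination_severity findings)

-- ===== LEMMAS AND PROOFS =====

-- proof-side names for the pieces of B
def pvBumpF (f : List (String × String)) : List (String × String) :=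
  ((PySem.Dict.mk f).insert "severity" "High").items
def pvByType (fs : List (List (String × String))) : PySem.Dict (Option String) (List Int) :=
  (PySem.List.enumerate fs).foldl
    (fun d p => d.modify ((PySem.Dict.mk p.2).get? "type") [] (· ++ [p.1])) PySem.Dict.empty
def pvAffected (hc hd hdf : Bool) : List String :=
  if hc then ["HTTP_CONFIG_FILE_EXPOSURE", "DEFAULT_FILE_EXPOSED", "DIRECTORY_LISTING_ENABLED"]
  else if hd && hdf then ["DIRECTORY_LISTING_ENABLED", "DEFAULT_FILE_EXPOSED"]
  else []

theorem pvBumpF_idem (f : List (String × String)) : pvBumpF (pvBumpF f) = pvBumpF f := by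
  show ((PySem.Dict.mk (((PySem.Dict.mk f).insert "severity" "High").items)).insert "severity" "High").items = _
  rw [show PySem.Dict.mk (((PySem.Dict.mk f).insert "severity" "High").items)
        = (PySem.Dict.mk f).insert "severity" "High" from rfl,
      PySem.Dict.insert_insert_self]
  rfl

theorem higher_severity_high (s : String) : higher_severity s "High" = "High" := by
  by_cases h4 : s = "High"
  · subst h4; simp [higher_severity]
  by_cases h0 : s = ""
  · subst h0; decide
  by_cases h1 : s = "Info"
  · subst h1; decide
  by_cases h2 : s = "Low"
  · subst h2; decide
  by_cases h3 : s = "Medium"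
  · subst h3; decide
  have hr : severity_rank s = 1 := by
    unfold severity_rank pvSEVERITY_ORDER
    have e : PySem.Dict.ofList [("Info", (1:Int)), ("Low", 2), ("Medium", 3), ("High", 4)]
        = PySem.Dict.mk [("Info", 1), ("Low", 2), ("Medium", 3), ("High", 4)] := by rfl
    rw [e, if_neg h0]
    simp [PySem.Dict.getD_eq_get?_getD, PySem.Dict.get?,
      Ne.symm h1, Ne.symm h2, Ne.symm h3, Ne.symm h4]
  unfold higher_severity
  rw [if_neg (by rw [hr]; decide)]

-- the bump fold, pointwise: positions in `is` get bumped (once or repeatedly, idempotently)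
theorem getElem?_foldl_bump (is : List Int) (xs : List (List (String × String)))
    (h : ∀ i ∈ is, ∃ n : Nat, i = (n : Int) ∧ n < xs.length) (k : Nat) :
    (is.foldl pvBumpIdx xs)[k]? = if (k : Int) ∈ is then xs[k]?.map pvBumpF else xs[k]? := by
  induction is generalizing xs with
  | nil => simp
  | cons i is ih =>
    obtain ⟨n, hi, hn⟩ := h i (List.mem_cons_self)
    subst hi
    have hstep : pvBumpIdx xs ((n : Nat) : Int) = xs.set n (pvBumpF (xs[n]'hn)) := by
      unfold pvBumpIdx
      rw [PySem.List.pyGet?_natCast, List.getElem?_eq_getElem hn]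
      simp [pvBumpF]
    have h' : ∀ i ∈ is, ∃ m : Nat, i = (m : Int) ∧ m < (xs.set n (pvBumpF (xs[n]'hn))).length := by
      intro i hi
      obtain ⟨m, rfl, hm⟩ := h i (List.mem_cons_of_mem _ hi)
      exact ⟨m, rfl, by simpa using hm⟩
    rw [List.foldl_cons, hstep, ih _ h', List.getElem?_set]
    by_cases hmem : (k : Int) ∈ is
    · rw [if_pos hmem, if_pos (List.mem_cons_of_mem _ hmem)]
      by_cases hk : n = k
      · subst hk
        rw [if_pos rfl, if_pos hn, List.getElem?_eq_getElem hn]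
        simp [pvBumpF_idem]
      · rw [if_neg hk]
    · rw [if_neg hmem]
      by_cases hk : n = k
      · subst hk
        rw [if_pos rfl, if_pos hn, List.getElem?_eq_getElem hn,
            if_pos (List.mem_cons_self)]
        rfl
      · rw [if_neg hk, if_neg (by
          intro hin
          rcases List.mem_cons.mp hin with he | hm
          · exact hk (by exact_mod_cast he.symm)
          · exact hmem hm)]

theorem foldl_foldl_bump (ts : List String) (g : String → List Int)
    (xs : List (List (String × String))) :
    ts.foldl (fun xs t => (g t).foldl pvBumpIdx xs) xs = (ts.flatMap g).foldl pvBumpIdx xs := by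
  induction ts generalizing xs with
  | nil => rfl
  | cons t ts ih => simp only [List.foldl_cons, List.flatMap_cons, List.foldl_append, ih]

theorem getD_pvByType (fs : List (List (String × String))) (t : Option String) :
    (pvByType fs).getD t []
      = ((PySem.List.enumerate fs).filter
          (fun p => (PySem.Dict.mk p.2).get? "type" == t)).map (·.1) := by
  unfold pvByType
  rw [show (PySem.List.enumerate fs).foldl
        (fun d p => d.modify ((PySem.Dict.mk p.2).get? "type") [] (· ++ [p.1])) PySem.Dict.empty
      = ((PySem.List.enumerate fs).map (fun p => ((PySem.Dict.mk p.2).get? "type", p.1))).foldl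
        (fun d q => d.modify q.1 [] (· ++ [q.2])) PySem.Dict.empty from
      (List.foldl_map (f := fun p : Int × List (String × String) => ((PySem.Dict.mk p.2).get? "type", p.1))
        (g := fun (d : PySem.Dict (Option String) (List Int)) q => d.modify q.1 [] (· ++ [q.2]))).symm]
  rw [PySem.Dict.getD_foldl_modify_append]
  simp [PySem.Dict.getD_empty, List.filter_map, List.map_map, Function.comp_def]

theorem mem_getD_pvByType (fs : List (List (String × String))) (t : String) (i : Int) :
    i ∈ (pvByType fs).getD (some t) []
      ↔ ∃ (n : Nat) (_ : n < fs.length), i = (n : Int) ∧ (PySem.Dict.mk fs[n]).get? "type" = some t := by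
  rw [getD_pvByType]
  simp only [List.mem_map, List.mem_filter, PySem.List.mem_enumerate_iff, beq_iff_eq]
  constructor
  · rintro ⟨p, ⟨⟨n, hn, rfl⟩, hp⟩, rfl⟩
    exact ⟨n, hn, by simp, by simpa using hp⟩
  · rintro ⟨n, hn, rfl, hp⟩
    exact ⟨((0 : Int) + n, fs[n]), ⟨⟨n, hn, rfl⟩, by simpa using hp⟩, by simp⟩

theorem contains_pvByType (fs : List (List (String × String))) (t : String) :
    (pvByType fs).contains (some t)
      = fs.any (fun f => (PySem.Dict.mk f).get? "type" == some t) := by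
  rw [Bool.eq_iff_iff]
  unfold pvByType
  rw [PySem.Dict.contains_iff_mem_keys, PySem.Dict.keys_foldl_modify_key]
  simp only [PySem.Dict.keys_empty]
  rw [show PySem.Set.update ([] : PySem.Set (Option String))
        ((PySem.List.enumerate fs).map (fun p => (PySem.Dict.mk p.2).get? "type"))
      = PySem.Set.ofList ((PySem.List.enumerate fs).map fun p => (PySem.Dict.mk p.2).get? "type")
      from rfl]
  rw [show (PySem.List.enumerate fs).map (fun p => (PySem.Dict.mk p.2).get? "type")
      = ((PySem.List.enumerate fs).map (·.2)).map (fun f => (PySem.Dict.mk f).get? "type")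
      from (List.map_map (g := fun f => (PySem.Dict.mk f).get? "type") (f := fun p : Int × List (String × String) => p.2)).symm,
    PySem.List.map_snd_enumerate]
  simp [PySem.Set.mem_ofList, List.mem_map, List.any_eq_true]

-- A's per-finding step, reduced to "type is in the affected group"
theorem stepA_eq (hc hd hdf : Bool) (f : List (String × String)) :
    (let finding_type : String :=
      match (PySem.Dict.mk f).get? "type" with
      | none => ""
      | some s => if s = "" then "" else s
     let severity : String :=
      match (PySem.Dict.mk f).get? "severity" with
      | none => "Info"
      | some s => if s = "" then "Info" else s
     if hc && (PySem.Set.contains (PySem.Set.ofList ["HTTP_CONFIG_FILE_EXPOSURE", "DEFAULT_FILE_EXPOSED", "DIRECTORY_LISTING_ENABLED"]) finding_type) then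
      ((PySem.Dict.mk f).insert "severity" (higher_severity severity "High")).items
     else if hd && hdf && (PySem.Set.contains (PySem.Set.ofList ["DIRECTORY_LISTING_ENABLED", "DEFAULT_FILE_EXPOSED"]) finding_type) then
      ((PySem.Dict.mk f).insert "severity" (higher_severity severity "High")).items
     else f)
    = if (PySem.Dict.mk f).get? "type" ∈ (pvAffected hc hd hdf).map some then pvBumpF f else f := by
  have c3 : ∀ s : String, PySem.Set.contains (PySem.Set.ofList
      ["HTTP_CONFIG_FILE_EXPOSURE", "DEFAULT_FILE_EXPOSED", "DIRECTORY_LISTING_ENABLED"]) s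
      = decide (s ∈ (["HTTP_CONFIG_FILE_EXPOSURE", "DEFAULT_FILE_EXPOSED", "DIRECTORY_LISTING_ENABLED"] : List String)) := by
    intro s
    rw [Bool.eq_iff_iff]
    simp [PySem.Set.mem_ofList]
  have c2 : ∀ s : String, PySem.Set.contains (PySem.Set.ofList
      ["DIRECTORY_LISTING_ENABLED", "DEFAULT_FILE_EXPOSED"]) s
      = decide (s ∈ (["DIRECTORY_LISTING_ENABLED", "DEFAULT_FILE_EXPOSED"] : List String)) := by
    intro s
    rw [Bool.eq_iff_iff]
    simp [PySem.Set.mem_ofList]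
  simp only [higher_severity_high]
  cases hty : (PySem.Dict.mk f).get? "type" with
  | none =>
      simp only [pvAffected, pvBumpF, c3, c2]
      cases hc <;> cases hd <;> cases hdf <;> simp
  | some t =>
      have hnorm : (if t = "" then "" else t) = t := by split <;> simp_all
      simp only [hnorm, pvAffected, pvBumpF, c3, c2]
      by_cases e1 : t = "HTTP_CONFIG_FILE_EXPOSURE" <;>
        by_cases e2 : t = "DEFAULT_FILE_EXPOSED" <;>
          by_cases e3 : t = "DIRECTORY_LISTING_ENABLED" <;>
            cases hc <;> cases hd <;> cases hdf <;> simp [e1, e2, e3]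

-- the indexed bump phase of B IS the per-element conditional map
theorem flat_foldl_char (fs : List (List (String × String))) (ts : List String) :
    ((ts.flatMap fun t => (pvByType fs).getD (some t) []).foldl pvBumpIdx fs)
      = fs.map (fun f => if (PySem.Dict.mk f).get? "type" ∈ ts.map some then pvBumpF f else f) := by
  apply List.ext_getElem?
  intro k
  rw [getElem?_foldl_bump _ _ (by
    intro i hi
    rcases List.mem_flatMap.mp hi with ⟨t, _, hit⟩
    rcases (mem_getD_pvByType fs t i).mp hit with ⟨n, hn, rfl, _⟩
    exact ⟨n, rfl, hn⟩)]
  rw [List.getElem?_map]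
  have hmemflat : ((k : Int) ∈ ts.flatMap fun t => (pvByType fs).getD (some t) [])
      ↔ ∃ (_ : k < fs.length), (PySem.Dict.mk (fs[k]?.getD [])).get? "type" ∈ ts.map some := by
    rw [List.mem_flatMap]
    constructor
    · rintro ⟨t, ht, hit⟩
      rcases (mem_getD_pvByType fs t _).mp hit with ⟨n, hn, he, hp⟩
      have hnk : n = k := by exact_mod_cast he.symm
      subst hnk
      refine ⟨hn, ?_⟩
      rw [List.getElem?_eq_getElem hn]
      simpa [hp] using List.mem_map_of_mem (f := some) ht
    · rintro ⟨hk, ht⟩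
      rw [List.getElem?_eq_getElem hk] at ht
      rcases List.mem_map.mp ht with ⟨t, htm, hts⟩
      exact ⟨t, htm, (mem_getD_pvByType fs t _).mpr ⟨k, hk, rfl, by simpa using hts.symm⟩⟩
  by_cases hk : k < fs.length
  · rw [List.getElem?_eq_getElem hk]
    simp only [Option.map_some]
    by_cases hmem : (PySem.Dict.mk fs[k]).get? "type" ∈ ts.map some
    · rw [if_pos (hmemflat.mpr ⟨hk, by rw [List.getElem?_eq_getElem hk]; simpa using hmem⟩), if_pos hmem]
    · rw [if_neg (by
        intro hin
        rcases hmemflat.mp hin with ⟨_, hm⟩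
        rw [List.getElem?_eq_getElem hk] at hm
        exact hmem (by simpa using hm)), if_neg hmem]
  · have hnone : fs[k]? = none := List.getElem?_eq_none (by omega)
    rw [if_neg (by intro hin; exact hk (hmemflat.mp hin).1), hnone]
    simp

-- B, characterised as the conditional map
theorem B_char (fs : List (List (String × String))) :
    apply_combination_severity_alt fs
      = fs.map (fun f => if (PySem.Dict.mk f).get? "type" ∈
          (pvAffected (fs.any (fun f => (PySem.Dict.mk f).get? "type" == some "HTTP_CONFIG_FILE_EXPOSURE"))
                      (fs.any (fun f => (PySem.Dict.mk f).get? "type" == some "DIRECTORY_LISTING_ENABLED"))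
                      (fs.any (fun f => (PySem.Dict.mk f).get? "type" == some "DEFAULT_FILE_EXPOSED"))).map some
          then pvBumpF f else f) := by
  have haff : (if (pvByType fs).contains (some "HTTP_CONFIG_FILE_EXPOSURE") then
        (["HTTP_CONFIG_FILE_EXPOSURE", "DEFAULT_FILE_EXPOSED", "DIRECTORY_LISTING_ENABLED"] : List String)
      else if (pvByType fs).contains (some "DIRECTORY_LISTING_ENABLED") && (pvByType fs).contains (some "DEFAULT_FILE_EXPOSED") then
        ["DIRECTORY_LISTING_ENABLED", "DEFAULT_FILE_EXPOSED"]
      else [])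
      = pvAffected (fs.any (fun f => (PySem.Dict.mk f).get? "type" == some "HTTP_CONFIG_FILE_EXPOSURE"))
                   (fs.any (fun f => (PySem.Dict.mk f).get? "type" == some "DIRECTORY_LISTING_ENABLED"))
                   (fs.any (fun f => (PySem.Dict.mk f).get? "type" == some "DEFAULT_FILE_EXPOSED")) := by
    rw [contains_pvByType, contains_pvByType, contains_pvByType]
    rfl
  calc apply_combination_severity_alt fs
      = (if (pvByType fs).contains (some "HTTP_CONFIG_FILE_EXPOSURE") then
          (["HTTP_CONFIG_FILE_EXPOSURE", "DEFAULT_FILE_EXPOSED", "DIRECTORY_LISTING_ENABLED"] : List String)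
        else if (pvByType fs).contains (some "DIRECTORY_LISTING_ENABLED") && (pvByType fs).contains (some "DEFAULT_FILE_EXPOSED") then
          ["DIRECTORY_LISTING_ENABLED", "DEFAULT_FILE_EXPOSED"]
        else []).foldl (fun xs t => ((pvByType fs).getD (some t) []).foldl pvBumpIdx xs) fs := rfl
    _ = _ := by
        rw [haff, foldl_foldl_bump, flat_foldl_char]

-- ===== VERDICT (by name: the statement is the Claim_ definition above) =====
theorem apply_combination_severity_spec : Claim_equal_apply_combination_severity := by
  intro fs _
  unfold Spec_apply_combination_severity
  by_cases hnil : fs = []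
  · subst hnil; rfl
  have hA : apply_combination_severity fs
      = fs.map (fun f => if (PySem.Dict.mk f).get? "type" ∈
          (pvAffected (fs.any (fun f => (PySem.Dict.mk f).get? "type" == some "HTTP_CONFIG_FILE_EXPOSURE"))
                      (fs.any (fun f => (PySem.Dict.mk f).get? "type" == some "DIRECTORY_LISTING_ENABLED"))
                      (fs.any (fun f => (PySem.Dict.mk f).get? "type" == some "DEFAULT_FILE_EXPOSED"))).map some
          then pvBumpF f else f) := by
    unfold apply_combination_severity
    rw [if_neg hnil]
    exact List.map_congr_left (fun f _ => stepA_eq _ _ _ f)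
  rw [hA, B_char]
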